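-- pv_equiv track=rewrite | github.com/cafeTechne/ableton-mcp | MCP_Server/mcp_tooling/strings/voicings.py | normalize_closed
-- ===== SOURCE A (Python) =====
-- from typing import List, Dict
--
-- def normalize_closed(tones: List[int], octave: int = 4) -> List[int]:
--     """Bring all tones into a single octave (closed position) starting at 'octave'."""
--     # Base pitch C{octave}
--     base = 12 * (octave + 1)
--
--     # Sort by pitch class
--     # Helper to get pc and original
--     pcs = sorted([(t % 12, t) for t in tones], key=lambda x: x[0])
--
--     # Reconstruct in octave
--     last_p = -1
--     closed = []
--
--     # Find the root (assuming tones[0] was root from theory check, but here we just stack)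
--     # Actually, theory.get_chord_notes returns [root, 3rd, 5th, 7th].
--     # We should preserve that order? No, voicing usually implies stacking.
--     # Let's stack them as close as possible.
--
--     # Logic: Start first note at base. Stack others on top.
--
--     # Better logic: Just modulo 12 all them, keep relative order if implied inversion?
--     # Let's just flatten to PC set and build up from Root.
--     # Assuming tones[0] is Bass Root.
--
--     root_pc = tones[0] % 12
--     current_octave_base = base
--
--     # Adjust base to match root pitch roughly?
--     # User passed `octave`.
--
--     new_tones = []
--
--     # Find which input is the root? tones[0]
--     # We will build Root, 3rd, 5th, 7th upwards.
--
--     # Map cleaned tones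
--     unique_pcs = []
--     seen = set()
--     for t in tones:
--         pc = t % 12
--         if pc not in seen:
--             unique_pcs.append(pc)
--             seen.add(pc)
--
--     # Normalize: Start with Root PC. Find next PC above it.
--     current_pitch = base + root_pc # This might be e.g. C4 or F4
--
--     # Ensure base is C-based.
--     # If root_pc is say G, and octave is 4 (C4=60), G4=67.
--     # If octave is 3 (C3=48), G3=55.
--
--     # Start root at the requested octave
--     # C=0.
--     start_pitch = (12 * (octave + 1)) + root_pc
--     new_tones.append(start_pitch)
--
--     last_pitch = start_pitch
--     for pc in unique_pcs[1:]:
--         # Find next occurrence of pc above last_pitch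
--         next_p = last_pitch + 1
--         while next_p % 12 != pc:
--             next_p += 1
--         new_tones.append(next_p)
--         last_pitch = next_p
--
--     return new_tones
-- ===== SOURCE B (Python) =====
-- def normalize_closed(tones, octave=4):
--     """Bring all tones into a single octave (closed position) starting at 'octave'."""
--     root_pc = tones[0] % 12
--     # Stage 1: root-relative intervals (semitones above the root), first occurrence order.
--     intervals = []
--     for t in tones:
--         iv = (t - root_pc) % 12
--         if iv not in intervals:
--             intervals.append(iv)
--     # Stage 2: each pitch is start + interval, bumped an octave every time the
--     # interval sequence descends (counting descents gives the octave offset).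
--     start = 12 * (octave + 1) + root_pc
--     out = []
--     octs, prev = 0, -1
--     for iv in intervals:
--         if iv <= prev:
--             octs += 1
--         out.append(start + iv + 12 * octs)
--         prev = iv
--     return out
-- ===== Notes on version B (the rewrite author's own statement) =====
-- stated objective: alternative
-- what changed: B recasts the computation in root-relative intervals: it dedups the intervals above the root (instead of absolute pitch classes) and derives each pitch directly as start + interval + 12 * (number of descents in the interval sequence so far), replacing A's sequential pitch-by-pitch upward while-search from the previous pitch; A's dead code (an unused O(n log n) sort, unused locals) is dropped.
import Mathlib
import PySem

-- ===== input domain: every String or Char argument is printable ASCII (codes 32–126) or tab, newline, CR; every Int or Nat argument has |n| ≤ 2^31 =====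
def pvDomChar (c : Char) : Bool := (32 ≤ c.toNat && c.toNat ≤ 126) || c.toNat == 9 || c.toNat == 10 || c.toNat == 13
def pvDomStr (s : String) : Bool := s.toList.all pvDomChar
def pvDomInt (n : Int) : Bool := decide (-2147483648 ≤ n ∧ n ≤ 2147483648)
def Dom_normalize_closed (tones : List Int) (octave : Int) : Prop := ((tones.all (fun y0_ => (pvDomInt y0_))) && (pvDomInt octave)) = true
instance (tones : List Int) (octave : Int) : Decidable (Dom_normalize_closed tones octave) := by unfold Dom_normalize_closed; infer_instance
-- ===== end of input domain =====

-- B recasts the voicing in root-relative intervals: it dedups the intervals above the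
-- root and gets each pitch as start + interval + 12 * (number of descents so far),
-- instead of A's pitch-by-pitch upward search for the next congruent pitch (simpler).

-- ===== PORT A =====
-- A's inner `while next_p % 12 != pc: next_p += 1`: ported with fuel 12 (the loop takes
-- at most 12 steps since pc = t % 12 ∈ [0,12)); the fuel only totalizes the same search.
def findNextPc (pc : Int) : Nat → Int → Int
  | 0, p => p
  | fuel+1, p => if PySem.Int.mod p 12 ≠ pc then findNextPc pc fuel (p + 1) else p

def normalize_closed (tones : List Int) (octave : Int) : List Int :=
  let _base : Int := 12 * (octave + 1)
  let _pcs := PySem.List.sorted (tones.map fun t => (PySem.Int.mod t 12, t)) (fun x => x.1) false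
  let _last_p : Int := -1
  let _closed : List Int := []
  -- tones[0]: total form pyGetD, exact under Pre_ (tones ≠ [])
  let root_pc := PySem.Int.mod (PySem.List.pyGetD tones 0 0) 12
  let _current_octave_base := _base
  -- dedup loop: state (unique_pcs, seen)
  let st := tones.foldl (fun (st : List Int × PySem.Set Int) t =>
      let pc := PySem.Int.mod t 12
      if st.2.contains pc then st else (st.1 ++ [pc], st.2.add pc))
    ([], PySem.Set.empty)
  let unique_pcs := st.1
  let _current_pitch := _base + root_pc
  let start_pitch := (12 * (octave + 1)) + root_pc
  let res := (unique_pcs.drop 1).foldl (fun (st : List Int × Int) pc =>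
      let next_p := findNextPc pc 12 (st.2 + 1)
      (st.1 ++ [next_p], next_p))
    ([start_pitch], start_pitch)
  res.1

-- ===== PORT B =====
def normalize_closed_alt (tones : List Int) (octave : Int) : List Int :=
  let root_pc := PySem.Int.mod (PySem.List.pyGetD tones 0 0) 12
  -- Stage 1: root-relative intervals, first occurrence order
  let intervals := tones.foldl (fun (l : List Int) t =>
      let iv := PySem.Int.mod (t - root_pc) 12
      if l.contains iv then l else l ++ [iv]) []
  -- Stage 2: start + interval, bumped an octave at every descent
  let start : Int := 12 * (octave + 1) + root_pc
  let res := intervals.foldl (fun (st : List Int × Int × Int) iv =>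
      let octs := if iv ≤ st.2.2 then st.2.1 + 1 else st.2.1
      (st.1 ++ [start + iv + 12 * octs], octs, iv)) ([], 0, -1)
  res.1

-- ===== PRECONDITION & SPEC =====
-- Pre_ excludes only the empty list, on which A raises IndexError (tones[0]).
def Pre_normalize_closed (tones : List Int) (octave : Int) : Prop := tones ≠ []
instance (tones : List Int) (octave : Int) : Decidable (Pre_normalize_closed tones octave) := by
  unfold Pre_normalize_closed; infer_instance
def pvWitness_normalize_closed : List Int × Int := ([60, 64, 67], 4)

def Spec_normalize_closed (tones : List Int) (octave : Int) (out : List Int) : Prop := out = normalize_closed_alt tones octave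
instance (tones : List Int) (octave : Int) (out : List Int) : Decidable (Spec_normalize_closed tones octave out) := by unfold Spec_normalize_closed; infer_instance

-- ===== CLAIM (what is proved, stated in full; the proofs are below) =====
def Claim_equal_normalize_closed : Prop := ∀ (tones : List Int) (octave : Int), Dom_normalize_closed tones octave → Pre_normalize_closed tones octave → Spec_normalize_closed tones octave (normalize_closed tones octave)

-- ===== LEMMAS AND PROOFS =====

-- A's (list, set) dedup fold keeps its two components equal, and equals Set.update.
lemma dedupA_eq (xs : List Int) (l : List Int) :
    (xs.foldl (fun (st : List Int × PySem.Set Int) t =>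
        if st.2.contains (PySem.Int.mod t 12) = true then st
        else (st.1 ++ [PySem.Int.mod t 12], st.2.add (PySem.Int.mod t 12))) (l, l))
      = (PySem.Set.update l (xs.map fun t => PySem.Int.mod t 12),
         PySem.Set.update l (xs.map fun t => PySem.Int.mod t 12)) := by
  induction xs generalizing l with
  | nil => simp [PySem.Set.update]
  | cons t ts ih =>
      have hstep : (if PySem.Set.contains l (PySem.Int.mod t 12) = true then (l, l)
            else (l ++ [PySem.Int.mod t 12], PySem.Set.add l (PySem.Int.mod t 12)))
          = (PySem.Set.add l (PySem.Int.mod t 12), PySem.Set.add l (PySem.Int.mod t 12)) := by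
        simp only [PySem.Set.add]
        split_ifs <;> rfl
      have hupd : ∀ ys : List Int, PySem.Set.update l (PySem.Int.mod t 12 :: ys)
          = PySem.Set.update (PySem.Set.add l (PySem.Int.mod t 12)) ys := by
        intro ys; rfl
      simp only [List.map_cons, List.foldl_cons]
      rw [hstep, hupd]
      exact ih _

-- closed form of A's upward search
lemma findNextPc_closed (pc : Int) (h0 : 0 ≤ pc) (h12 : pc < 12) :
    ∀ (n : Nat) (s : Int), PySem.Int.mod (pc - s) 12 < (n : Int) →
      findNextPc pc n s = s + PySem.Int.mod (pc - s) 12 := by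
  intro n
  induction n with
  | zero =>
      intro s h
      have := PySem.Int.mod_nonneg (pc - s) (show (0:Int) < 12 by norm_num)
      simp at h
      omega
  | succ n ih =>
      intro s h
      rw [PySem.Int.mod_eq_emod_of_pos (by norm_num)] at h ⊢
      by_cases hs : PySem.Int.mod s 12 = pc
      · have hs' : s % 12 = pc := by
          rw [PySem.Int.mod_eq_emod_of_pos (by norm_num)] at hs; exact hs
        have hz : (pc - s) % 12 = 0 := by omega
        rw [hz, add_zero]
        simp only [findNextPc, if_neg (not_not_intro hs)]
      · have hs' : s % 12 ≠ pc := by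
          rw [PySem.Int.mod_eq_emod_of_pos (by norm_num)] at hs; exact hs
        have hne : (pc - s) % 12 ≠ 0 := by omega
        have hstep : (pc - (s + 1)) % 12 = (pc - s) % 12 - 1 := by omega
        have hrec := ih (s + 1)
          (by rw [PySem.Int.mod_eq_emod_of_pos (by norm_num)]; push_cast at h ⊢; omega)
        rw [PySem.Int.mod_eq_emod_of_pos (by norm_num)] at hrec
        simp only [findNextPc, if_pos (show PySem.Int.mod s 12 ≠ pc from hs)]
        rw [hrec, hstep]; ring

-- A's search fold in modular form, when every pitch class is in [0, 12)
lemma fold_eq (l : List Int) (hl : ∀ pc ∈ l, 0 ≤ pc ∧ pc < 12) :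
    ∀ st : List Int × Int,
      l.foldl (fun (st : List Int × Int) pc =>
          (st.1 ++ [findNextPc pc 12 (st.2 + 1)], findNextPc pc 12 (st.2 + 1))) st
      = l.foldl (fun (st : List Int × Int) pc =>
          (st.1 ++ [st.2 + (1 + PySem.Int.mod (pc - st.2 - 1) 12)],
           st.2 + (1 + PySem.Int.mod (pc - st.2 - 1) 12))) st := by
  induction l with
  | nil => intro st; rfl
  | cons pc l ih =>
      intro st
      have hpc := hl pc (List.mem_cons_self ..)
      have hcf := findNextPc_closed pc hpc.1 hpc.2 12 (st.2 + 1)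
        (by exact_mod_cast PySem.Int.mod_lt (pc - (st.2 + 1)) (show (0:Int) < 12 by norm_num))
      have harg : pc - (st.2 + 1) = pc - st.2 - 1 := by ring
      simp only [List.foldl_cons]
      rw [hcf, harg, add_assoc]
      exact ih (fun x hx => hl x (List.mem_cons_of_mem _ hx)) _

lemma pc_bounds (t : Int) : 0 ≤ PySem.Int.mod t 12 ∧ PySem.Int.mod t 12 < 12 :=
  ⟨PySem.Int.mod_nonneg t (by norm_num), PySem.Int.mod_lt t (by norm_num)⟩

-- Set.update only appends elements of the pushed list
lemma update_prefix (l : List Int) : ∀ acc : List Int,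
    ∃ ext, PySem.Set.update acc l = acc ++ ext ∧ ∀ x ∈ ext, x ∈ l := by
  induction l with
  | nil => intro acc; exact ⟨[], by simp [PySem.Set.update], by simp⟩
  | cons a l ih =>
      intro acc
      have hstep : PySem.Set.update acc (a :: l) = PySem.Set.update (PySem.Set.add acc a) l := rfl
      by_cases hc : a ∈ acc
      · obtain ⟨ext, he, hm⟩ := ih acc
        refine ⟨ext, ?_, fun x hx => List.mem_cons_of_mem _ (hm x hx)⟩
        rw [hstep, show PySem.Set.add acc a = acc by
          simp only [PySem.Set.add, PySem.Set.contains, List.contains_iff_mem]; rw [if_pos hc]]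
        exact he
      · obtain ⟨ext, he, hm⟩ := ih (acc ++ [a])
        refine ⟨a :: ext, ?_, ?_⟩
        · rw [hstep, show PySem.Set.add acc a = acc ++ [a] by
            simp only [PySem.Set.add, PySem.Set.contains, List.contains_iff_mem]; rw [if_neg hc]]
          rw [he]; simp
        · intro x hx
          rcases List.mem_cons.mp hx with h | h
          · exact h ▸ List.mem_cons_self ..
          · exact List.mem_cons_of_mem _ (hm x h)

-- mapping by the (injective on [0,12)) interval function preserves membership
lemma mem_map_iv_iff (root : Int) (acc : List Int) (h : ∀ x ∈ acc, 0 ≤ x ∧ x < 12)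
    (pc : Int) (h0 : 0 ≤ pc) (h12 : pc < 12) :
    PySem.Int.mod (pc - root) 12 ∈ acc.map (fun x => PySem.Int.mod (x - root) 12) ↔ pc ∈ acc := by
  constructor
  · intro hmem
    obtain ⟨x, hx, hex⟩ := List.mem_map.mp hmem
    have hb := h x hx
    rw [PySem.Int.mod_eq_emod_of_pos (by norm_num), PySem.Int.mod_eq_emod_of_pos (by norm_num)] at hex
    have : x = pc := by omega
    exact this ▸ hx
  · intro hmem
    exact List.mem_map_of_mem hmem

-- B's dedup fold is A's dedup fold mapped through the interval function
lemma dedupB_eq (root : Int) : ∀ (xs : List Int) (acc : List Int),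
    (∀ x ∈ acc, 0 ≤ x ∧ x < 12) →
    xs.foldl (fun (l : List Int) t =>
        if l.contains (PySem.Int.mod (t - root) 12) = true then l
        else l ++ [PySem.Int.mod (t - root) 12])
      (acc.map (fun x => PySem.Int.mod (x - root) 12))
    = (PySem.Set.update acc (xs.map fun t => PySem.Int.mod t 12)).map
        (fun x => PySem.Int.mod (x - root) 12) := by
  intro xs
  induction xs with
  | nil => intro acc _; simp [PySem.Set.update]
  | cons t ts ih =>
      intro acc hacc
      have hpcb := pc_bounds t
      have hkey : PySem.Int.mod (t - root) 12
          = PySem.Int.mod (PySem.Int.mod t 12 - root) 12 := by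
        rw [PySem.Int.mod_eq_emod_of_pos (show (0:Int) < 12 by norm_num),
            PySem.Int.mod_eq_emod_of_pos (show (0:Int) < 12 by norm_num),
            PySem.Int.mod_eq_emod_of_pos (show (0:Int) < 12 by norm_num)]
        omega
      have hupd : PySem.Set.update acc (PySem.Int.mod t 12 :: ts.map (fun t => PySem.Int.mod t 12))
          = PySem.Set.update (PySem.Set.add acc (PySem.Int.mod t 12)) (ts.map fun t => PySem.Int.mod t 12) := rfl
      have hmemiff := mem_map_iv_iff root acc hacc (PySem.Int.mod t 12) hpcb.1 hpcb.2
      simp only [List.foldl_cons, List.map_cons, hupd, hkey]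
      by_cases hmem : PySem.Int.mod t 12 ∈ acc
      · have hcB : (acc.map (fun x => PySem.Int.mod (x - root) 12)).contains
            (PySem.Int.mod (PySem.Int.mod t 12 - root) 12) = true := by
          rw [List.contains_iff_mem]; exact hmemiff.mpr hmem
        have hadd : PySem.Set.add acc (PySem.Int.mod t 12) = acc := by
          simp only [PySem.Set.add, PySem.Set.contains, List.contains_iff_mem]
          rw [if_pos hmem]
        rw [hcB, if_pos rfl, hadd]
        exact ih acc hacc
      · have hcB : (acc.map (fun x => PySem.Int.mod (x - root) 12)).contains
            (PySem.Int.mod (PySem.Int.mod t 12 - root) 12) = false := by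
          rw [Bool.eq_false_iff, ne_eq, List.contains_iff_mem]
          exact fun h => hmem (hmemiff.mp h)
        have hadd : PySem.Set.add acc (PySem.Int.mod t 12) = acc ++ [PySem.Int.mod t 12] := by
          simp only [PySem.Set.add, PySem.Set.contains, List.contains_iff_mem]
          rw [if_neg hmem]
        rw [hcB, if_neg (by simp), hadd]
        have hacc' : ∀ x ∈ acc ++ [PySem.Int.mod t 12], 0 ≤ x ∧ x < 12 := by
          intro x hx
          rcases List.mem_append.mp hx with h | h
          · exact hacc x h
          · exact (List.mem_singleton.mp h) ▸ hpcb
        have := ih (acc ++ [PySem.Int.mod t 12]) hacc'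
        simpa using this

-- the modular-step fold and B's interval/descent fold produce the same list
lemma fold_main (root octave : Int) : ∀ (pcs : List Int), (∀ pc ∈ pcs, 0 ≤ pc ∧ pc < 12) →
    ∀ (acc : List Int) (octs prev last : Int), 0 ≤ prev → prev < 12 →
    last = 12 * (octave + 1) + root + prev + 12 * octs →
    (pcs.foldl (fun (st : List Int × Int) pc =>
        (st.1 ++ [st.2 + (1 + PySem.Int.mod (pc - st.2 - 1) 12)],
         st.2 + (1 + PySem.Int.mod (pc - st.2 - 1) 12)))
      (acc, last)).1
    = ((pcs.map (fun pc => PySem.Int.mod (pc - root) 12)).foldl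
        (fun (st : List Int × Int × Int) iv =>
          (st.1 ++ [12 * (octave + 1) + root + iv +
             12 * if iv ≤ st.2.2 then st.2.1 + 1 else st.2.1],
           if iv ≤ st.2.2 then st.2.1 + 1 else st.2.1, iv))
        (acc, octs, prev)).1 := by
  intro pcs
  induction pcs with
  | nil => intro _ acc octs prev last _ _ _; rfl
  | cons pc rest ih =>
      intro hb acc octs prev last hp0 hp12 hlast
      subst hlast
      have hivb := pc_bounds (pc - root)
      have hcur : (12 * (octave + 1) + root + prev + 12 * octs)
            + (1 + PySem.Int.mod (pc - (12 * (octave + 1) + root + prev + 12 * octs) - 1) 12)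
          = 12 * (octave + 1) + root + PySem.Int.mod (pc - root) 12
            + 12 * (if PySem.Int.mod (pc - root) 12 ≤ prev then octs + 1 else octs) := by
        simp only [PySem.Int.mod_eq_emod_of_pos (show (0:Int) < 12 by norm_num)] at hivb ⊢
        split_ifs with hle <;> omega
      simp only [List.map_cons, List.foldl_cons]
      rw [hcur]
      exact ih (fun x hx => hb x (List.mem_cons_of_mem _ hx))
        (acc ++ [12 * (octave + 1) + root + PySem.Int.mod (pc - root) 12
          + 12 * (if PySem.Int.mod (pc - root) 12 ≤ prev then octs + 1 else octs)])
        (if PySem.Int.mod (pc - root) 12 ≤ prev then octs + 1 else octs)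
        (PySem.Int.mod (pc - root) 12) _ hivb.1 hivb.2 rfl

-- ===== VERDICT (by name: the statement is the Claim_ definition above) =====
theorem normalize_closed_spec : Claim_equal_normalize_closed := by
  intro tones octave _ hpre
  unfold Spec_normalize_closed normalize_closed normalize_closed_alt
  obtain ⟨t0, ts, rfl⟩ : ∃ t0 ts, tones = t0 :: ts := by
    cases tones with
    | nil => exact absurd rfl hpre
    | cons a l => exact ⟨a, l, rfl⟩
  have hget : PySem.List.pyGetD (t0 :: ts) 0 0 = t0 := by
    simp [PySem.List.pyGetD, PySem.List.pyGet?, PySem.List.pyIdx?]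
  obtain ⟨ext, hext, hextm⟩ :=
    update_prefix (ts.map fun t => PySem.Int.mod t 12) [PySem.Int.mod t0 12]
  have huA : PySem.Set.update ([] : List Int) ((t0 :: ts).map fun t => PySem.Int.mod t 12)
      = PySem.Int.mod t0 12 :: ext := by
    rw [show PySem.Set.update ([] : List Int) ((t0 :: ts).map fun t => PySem.Int.mod t 12)
        = PySem.Set.update [PySem.Int.mod t0 12] (ts.map fun t => PySem.Int.mod t 12) from rfl,
      hext]
    rfl
  have hextb : ∀ x ∈ ext, 0 ≤ x ∧ x < 12 := by
    intro x hx
    obtain ⟨t, _, rfl⟩ := List.mem_map.mp (hextm x hx)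
    exact pc_bounds t
  have hdedupB := dedupB_eq (PySem.Int.mod t0 12) (t0 :: ts) [] (by intro x hx; simp at hx)
  simp only [List.map_nil] at hdedupB
  have hivroot : PySem.Int.mod (PySem.Int.mod t0 12 - PySem.Int.mod t0 12) 12 = 0 := by
    simp
  simp only [hget, PySem.Set.empty]
  rw [dedupA_eq (t0 :: ts) [], hdedupB, huA]
  rw [fold_eq ((PySem.Int.mod t0 12 :: ext).drop 1) (by simpa using hextb)]
  simp only [List.drop_succ_cons, List.drop_zero, List.map_cons, List.foldl_cons, hivroot]
  rw [show (if (0:Int) ≤ -1 then (0:Int) + 1 else 0) = 0 from by norm_num]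
  rw [show 12 * (octave + 1) + PySem.Int.mod t0 12 + 0 + 12 * 0
      = 12 * (octave + 1) + PySem.Int.mod t0 12 from by ring]
  exact fold_main (PySem.Int.mod t0 12) octave ext hextb
    [12 * (octave + 1) + PySem.Int.mod t0 12] 0 0 _ (by norm_num) (by norm_num) (by ring)
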